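-- pv_equiv track=rewrite | github.com/pmaglione/adaptive-pomdp-solutions | pomdp_extensions.py | get_workers_order
-- ===== SOURCE A (Python) =====
-- def get_workers_order(votes):
--     worker_order = 0
--     worker_to_order = {}
--     order_to_worker = {}
--     num_votes = 0
--     num_workers = 0
--     num_items = len(votes)
--
--     for item_id, item_votes in votes.items():
--         for worker_id, vote in item_votes.items():
--             num_votes += 1
--             if worker_id not in worker_to_order.keys():
--                 worker_to_order[worker_id] = worker_order
--                 order_to_worker[worker_order] = worker_id
--                 worker_order += 1
--
--     num_workers = len(worker_to_order)
--
--     return num_items, num_workers, num_votes, worker_to_order, order_to_worker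
-- ===== SOURCE B (Python) =====
-- def get_workers_order(votes):
--     stream = [w for item_votes in votes.values() for w in item_votes]
--     # Each distinct worker's rank is the position of its first vote in the flattened
--     # stream, so sorting the distinct workers by stream.index reproduces A's order.
--     workers = sorted(set(stream), key=stream.index)
--     worker_to_order = {w: i for i, w in enumerate(workers)}
--     order_to_worker = dict(enumerate(workers))
--     return len(votes), len(workers), len(stream), worker_to_order, order_to_worker
-- ===== Notes on version B (the rewrite author's own statement) =====
-- stated objective: alternative
-- what changed: Replaces A's membership-guarded nested loop that builds both index maps incrementally by flattening the vote stream, sorting the distinct workers by the index of their first appearance, and building both maps from enumerate of that sorted list.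
import Mathlib
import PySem

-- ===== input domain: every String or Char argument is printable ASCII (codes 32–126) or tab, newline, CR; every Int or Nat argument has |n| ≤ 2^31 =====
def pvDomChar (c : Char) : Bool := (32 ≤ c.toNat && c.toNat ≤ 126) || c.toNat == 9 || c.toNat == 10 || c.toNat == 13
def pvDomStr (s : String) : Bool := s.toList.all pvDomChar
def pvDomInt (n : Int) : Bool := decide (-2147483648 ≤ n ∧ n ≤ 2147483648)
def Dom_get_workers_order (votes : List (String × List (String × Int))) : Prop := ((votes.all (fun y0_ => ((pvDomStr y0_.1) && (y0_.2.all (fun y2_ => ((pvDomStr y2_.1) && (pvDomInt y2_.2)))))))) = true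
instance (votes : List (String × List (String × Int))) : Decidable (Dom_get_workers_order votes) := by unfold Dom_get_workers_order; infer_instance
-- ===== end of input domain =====

-- B replaces A's membership-guarded nested loop by flattening the vote stream, sorting the
-- distinct workers by the index of their first appearance, and building both index maps
-- from enumerate of that sorted list (objective: alternative).

-- ===== PORT A =====
-- inner loop body of A: (worker_order, worker_to_order, order_to_worker, num_votes) updated per vote
def pvStepA (st : Int × PySem.Dict String Int × PySem.Dict Int String × Int)
    (wv : String × Int) : Int × PySem.Dict String Int × PySem.Dict Int String × Int :=
  let nv := st.2.2.2 + 1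
  if st.2.1.contains wv.1 then (st.1, st.2.1, st.2.2.1, nv)
  else (st.1 + 1, st.2.1.insert wv.1 st.1, st.2.2.1.insert st.1 wv.1, nv)

def get_workers_order (votes : List (String × List (String × Int))) :
    Int × Int × Int × (List (String × Int)) × (List (Int × String)) :=
  let num_items : Int := (votes.length : Int)
  let st := votes.foldl (fun st iv => iv.2.foldl pvStepA st)
    ((0 : Int), PySem.Dict.empty, PySem.Dict.empty, (0 : Int))
  (num_items, (st.2.1.size : Int), st.2.2.2, st.2.1.items, st.2.2.1.items)

-- ===== PORT B =====
def get_workers_order_alt (votes : List (String × List (String × Int))) :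
    Int × Int × Int × (List (String × Int)) × (List (Int × String)) :=
  let stream := votes.flatMap (fun iv => iv.2.map (fun wv => wv.1))
  -- sorted(set(stream), key=stream.index): the key is only evaluated on members of
  -- stream, where list.index returns; .getD 0 is therefore never the raising case
  let workers := PySem.List.sorted (PySem.Set.ofList stream)
    (fun w => (PySem.List.index? stream w).getD 0) false
  let worker_to_order := (PySem.List.enumerate workers 0).map (fun p => (p.2, p.1))
  let order_to_worker := PySem.List.enumerate workers 0
  ((votes.length : Int), (workers.length : Int), (stream.length : Int),
    worker_to_order, order_to_worker)

-- ===== PRECONDITION & SPEC =====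
def Spec_get_workers_order (votes : List (String × List (String × Int))) (out : Int × Int × Int × (List (String × Int)) × (List (Int × String))) : Prop := out = get_workers_order_alt votes
instance (votes : List (String × List (String × Int))) (out : Int × Int × Int × (List (String × Int)) × (List (Int × String))) : Decidable (Spec_get_workers_order votes out) := by
  unfold Spec_get_workers_order
  letI d1 : DecidableEq (List (String × Int) × List (Int × String)) := instDecidableEqProd
  letI d2 : DecidableEq (Int × List (String × Int) × List (Int × String)) := instDecidableEqProd
  letI d3 : DecidableEq (Int × Int × List (String × Int) × List (Int × String)) := instDecidableEqProd
  letI d4 : DecidableEq (Int × Int × Int × List (String × Int) × List (Int × String)) := instDecidableEqProd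
  exact d4 _ _

-- ===== CLAIM (what is proved, stated in full; the proofs are below) =====
def Claim_equal_get_workers_order : Prop := ∀ (votes : List (String × List (String × Int))), Dom_get_workers_order votes → Spec_get_workers_order votes (get_workers_order votes)

-- ===== LEMMAS AND PROOFS =====

-- the invariant state of A's loop after the worker stream f has been processed
def pvState (f : List String) : Int × PySem.Dict String Int × PySem.Dict Int String × Int :=
  ((( PySem.List.dedup f).length : Int),
   PySem.Dict.mk ((PySem.List.enumerate (PySem.List.dedup f) 0).map (fun p => (p.2, p.1))),
   PySem.Dict.mk (PySem.List.enumerate (PySem.List.dedup f) 0),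
   (f.length : Int))

theorem pvState_nil : pvState [] = ((0 : Int), PySem.Dict.empty, PySem.Dict.empty, (0 : Int)) := rfl

theorem pv_dedup_snoc (f : List String) (w : String) :
    PySem.List.dedup (f ++ [w]) =
      if w ∈ f then PySem.List.dedup f else PySem.List.dedup f ++ [w] := by
  simp only [PySem.List.dedup_eq_ofList, PySem.Set.ofList_eq_foldl, List.foldl_append,
    List.foldl_cons, List.foldl_nil]
  rw [← PySem.Set.ofList_eq_foldl]
  by_cases h : w ∈ f
  · rw [PySem.Set.add_of_mem (by rw [PySem.Set.mem_ofList]; exact h)]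
    simp [h]
  · rw [PySem.Set.add_of_not_mem (by rw [PySem.Set.mem_ofList]; exact h)]
    simp [h]

theorem pv_contains_w2o (f : List String) (w : String) :
    (PySem.Dict.mk ((PySem.List.enumerate (PySem.List.dedup f) 0).map
        (fun p => (p.2, p.1)))).contains w = decide (w ∈ f) := by
  rw [PySem.Dict.contains_eq_decide_mem_keys]
  have hk : (PySem.Dict.mk ((PySem.List.enumerate (PySem.List.dedup f) 0).map
      (fun p => (p.2, p.1)))).keys = PySem.List.dedup f := by
    simp only [PySem.Dict.keys, List.map_map]
    rw [show ((fun (x : String × Int) => x.1) ∘ (fun (p : Int × String) => (p.2, p.1)))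
        = (fun (p : Int × String) => p.2) from rfl]
    exact PySem.List.map_snd_enumerate _ _
  rw [hk]
  simp

theorem pv_contains_o2w (f : List String) :
    (PySem.Dict.mk (PySem.List.enumerate (PySem.List.dedup f) 0)).contains
      ((PySem.List.dedup f).length : Int) = false := by
  rw [PySem.Dict.contains_mk]
  rw [List.any_eq_false]
  intro p hp
  rcases (PySem.List.mem_enumerate_iff _ _ _).mp hp with ⟨k, hk, rfl⟩
  simp only [PySem.List.dedup_eq_ofList] at hk
  simp
  omega

theorem pv_stepA (f : List String) (wv : String × Int) :
    pvStepA (pvState f) wv = pvState (f ++ [wv.1]) := by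
  unfold pvStepA
  simp only [pvState]
  rw [pv_contains_w2o]
  by_cases h : wv.1 ∈ f
  · have hd : PySem.List.dedup (f ++ [wv.1]) = PySem.List.dedup f := by
      rw [pv_dedup_snoc]; simp [h]
    simp only [h, decide_true, if_true, hd, List.length_append, List.length_cons,
      List.length_nil]
    push_cast
    rfl
  · have hd : PySem.List.dedup (f ++ [wv.1]) = PySem.List.dedup f ++ [wv.1] := by
      rw [pv_dedup_snoc]; simp [h]
    have hc1 : (PySem.Dict.mk ((PySem.List.enumerate (PySem.List.dedup f) 0).map
        (fun p => (p.2, p.1)))).contains wv.1 = false := by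
      rw [pv_contains_w2o]; simp [h]
    simp only [h, decide_false, Bool.false_eq_true, if_false]
    refine Prod.ext ?_ (Prod.ext ?_ (Prod.ext ?_ ?_)) <;> simp only
    · rw [hd]; simp only [List.length_append, List.length_cons, List.length_nil]; push_cast; ring
    · apply PySem.Dict.ext
      rw [PySem.Dict.items_insert_of_not_contains _ _ hc1]
      rw [hd, PySem.List.enumerate_append]
      simp [PySem.List.enumerate_cons, PySem.List.enumerate_nil]
    · apply PySem.Dict.ext
      rw [PySem.Dict.items_insert_of_not_contains _ _ (pv_contains_o2w f)]
      rw [hd, PySem.List.enumerate_append]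
      simp [PySem.List.enumerate_cons, PySem.List.enumerate_nil]
    · simp only [List.length_append, List.length_cons, List.length_nil]; push_cast; ring

theorem pv_inner (qs : List (String × Int)) (f : List String) :
    qs.foldl pvStepA (pvState f) = pvState (f ++ qs.map (fun wv => wv.1)) := by
  induction qs generalizing f with
  | nil => simp
  | cons q qs ih =>
    simp only [List.foldl_cons, pv_stepA, List.map_cons, ih]
    simp

theorem pv_outer (votes : List (String × List (String × Int))) (f : List String) :
    votes.foldl (fun st iv => iv.2.foldl pvStepA st) (pvState f) =
      pvState (f ++ votes.flatMap (fun iv => iv.2.map (fun wv => wv.1))) := by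
  induction votes generalizing f with
  | nil => simp
  | cons v vs ih =>
    simp only [List.foldl_cons, pv_inner, ih, List.flatMap_cons, List.append_assoc]

-- first-appearance indices are strictly increasing along the ordered dedup of f
theorem pv_dedup_pairwise (f : List String) :
    (PySem.List.dedup f).Pairwise
      (fun a b => (PySem.List.index? f a).getD 0 < (PySem.List.index? f b).getD 0) := by
  induction f using List.reverseRecOn with
  | nil => simp [PySem.List.dedup]
  | append_singleton f w ih =>
    have hkeep : ∀ a ∈ f, PySem.List.index? (f ++ [w]) a = PySem.List.index? f a :=
      fun a ha => PySem.List.index?_append_of_mem _ ha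
    have hmemded : ∀ a, a ∈ PySem.List.dedup f → a ∈ f := by
      intro a ha; exact (PySem.List.mem_dedup _ _).mp ha
    rw [pv_dedup_snoc]
    by_cases h : w ∈ f
    · simp only [h, if_true]
      refine ih.imp_of_mem ?_
      intro a b ha hb hab
      rw [hkeep a (hmemded a ha), hkeep b (hmemded b hb)]
      exact hab
    · simp only [h, if_false]
      rw [List.pairwise_append]
      refine ⟨ih.imp_of_mem ?_, by simp, ?_⟩
      · intro a b ha hb hab
        rw [hkeep a (hmemded a ha), hkeep b (hmemded b hb)]
        exact hab
      · intro a ha b hb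
        simp only [List.mem_singleton] at hb
        subst hb
        have haf := hmemded a ha
        rw [hkeep a haf, PySem.List.index?_append_singleton_self _ _ h]
        rcases Option.isSome_iff_exists.mp ((PySem.List.index?_isSome_iff _ _).mpr haf)
          with ⟨k, hk⟩
        rcases (PySem.List.index?_eq_some_iff _ _ _).mp hk with ⟨pre, suf, hsplit, hlen, _⟩
        rw [hk]
        simp only [Option.getD_some]
        subst hsplit
        simp
        omega

-- B's sorted distinct-worker list is exactly the ordered dedup of the stream
theorem pv_sorted_eq_dedup (f : List String) :
    PySem.List.sorted (PySem.Set.ofList f)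
      (fun w => (PySem.List.index? f w).getD 0) false = PySem.List.dedup f := by
  exact PySem.List.sorted_eq_of_perm_of_pairwise_lt _ _ _
    (by simp only [PySem.List.dedup_eq_ofList]; exact List.Perm.refl _) (pv_dedup_pairwise f)

-- ===== VERDICT (by name: the statement is the Claim_ definition above) =====
theorem get_workers_order_spec : Claim_equal_get_workers_order := by
  intro votes _
  unfold Spec_get_workers_order get_workers_order get_workers_order_alt
  rw [← pvState_nil, pv_outer]
  simp only [pv_sorted_eq_dedup]
  simp only [List.nil_append]
  refine Prod.ext rfl (Prod.ext ?_ (Prod.ext ?_ ?_))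
  · simp [pvState, PySem.Dict.size, PySem.List.length_enumerate]
  · rfl
  · exact Prod.ext rfl rfl
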